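-- pv_equiv track=rewrite | github.com/aliciasagdullaeva/DiscreteCalc | algorithms/TDNF_coder.py | find_vector
-- ===== SOURCE A (Python) =====
-- def bool_up(line: list, n: int):
--     for x in range(n - 1, -1, -1):
--         if line[x] == 0:
--             line[x] = 1
--             break
--         else:
--             line[x] = 0
--
-- def create_truth_table(n: int):
--     truth_table = []
--     line = []
--     for i in range(n):
--         line.append(0)
--     for i in range(2 ** n):
--         truth_table.append(line.copy())
--         bool_up(line, n)
--     return truth_table
--
-- def find_vector(dnf: list, n: int):
--     vector = []
--     truth_table = create_truth_table(n)
--     for line in truth_table: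
--         disjunction = 0
--         for part in dnf:
--             conjunction = 1
--             for i, x in enumerate(part):
--                 if x == '1':
--                     conjunction &= line[i]
--                 elif x == '0':
--                     conjunction &= 0 ** line[i]
--                 elif x == '*':
--                     continue
--             disjunction |= conjunction
--         vector.append(disjunction)
--     return vector
-- ===== SOURCE B (Python) =====
-- def find_vector(dnf: list, n: int):
--     # Subcube filling: start from an all-zero vector and, for each term, set the
--     # indices of the assignments it covers to 1 (row index = the row's bits, MSB first).
--     size = 2 ** n
--     vector = []
--     for _ in range(size):
--         vector.append(0)
--     for part in dnf:
--         idxs = [0]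
--         for j in range(n):
--             x = part[j] if j < len(part) else '*'
--             if x == '1':
--                 idxs = [2 * i + 1 for i in idxs]
--             elif x == '0':
--                 idxs = [2 * i for i in idxs]
--             else:
--                 idxs = [2 * i for i in idxs] + [2 * i + 1 for i in idxs]
--         for i in idxs:
--             vector[i] = 1
--     return vector
-- ===== Notes on version B (the rewrite author's own statement) =====
-- stated objective: alternative
-- what changed: Instead of materialising all 2^n truth-table rows by repeated in-place binary increments and evaluating every DNF term on every row, B zero-initialises the output vector and, for each term, enumerates only the row indices of the subcube that term covers (doubling an index list across the n positions) and sets those entries to 1.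
import Mathlib
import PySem

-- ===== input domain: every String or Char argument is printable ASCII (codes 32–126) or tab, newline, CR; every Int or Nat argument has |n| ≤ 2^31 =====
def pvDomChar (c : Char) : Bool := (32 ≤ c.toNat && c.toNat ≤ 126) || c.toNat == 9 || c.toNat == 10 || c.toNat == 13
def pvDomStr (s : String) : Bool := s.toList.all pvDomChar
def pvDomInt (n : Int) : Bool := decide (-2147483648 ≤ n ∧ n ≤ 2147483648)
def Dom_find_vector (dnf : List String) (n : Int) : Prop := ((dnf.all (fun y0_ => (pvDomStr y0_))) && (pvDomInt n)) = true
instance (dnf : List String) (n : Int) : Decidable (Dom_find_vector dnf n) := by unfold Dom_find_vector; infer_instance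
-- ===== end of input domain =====

-- B replaces A's full 2^n x |dnf| x n truth-table evaluation by zero-initialising the
-- output vector and, per DNF term, setting only the indices of the subcube it covers to 1
-- (objective: alternative — a genuinely different algorithm of the same worst-case cost).

-- ===== PORT A =====
-- loop body of bool_up over the descending index range; the `none` arm is Python's
-- IndexError (never reached from create_truth_table, where |line| = n)
def boolUpGo : List Int → List Int → List Int
  | line, [] => line
  | line, x :: rest =>
    match PySem.List.pyGet? line x with
    | none => line
    | some v =>
      if v == 0 then line.set x.toNat 1                -- line[x] = 1; break   (here 0 ≤ x)
      else boolUpGo (line.set x.toNat 0) rest          -- line[x] = 0; continue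

def bool_up (line : List Int) (n : Int) : List Int :=
  boolUpGo line (PySem.List.pyRange (n - 1) (-1) (-1))

-- for n < 0 Python's range(2**n) raises TypeError (float); those inputs are outside Pre_
def create_truth_table (n : Int) : List (List Int) :=
  let line := (List.range n.toNat).foldl (fun l _ => l ++ [(0 : Int)]) []
  ((List.range (2 ^ n.toNat)).foldl
    (fun (st : List (List Int) × List Int) _ => (st.1 ++ [st.2], bool_up st.2 n))
    ([], line)).1

-- one step of A's conjunction loop; the `none` arms are Python's IndexError (outside Pre_);
-- 0 ** line[i] is ported as (0:Int) ^ v.toNat, exact since line[i] ∈ {0, 1}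
def conjStep (line : List Int) (c : Int) (p : Int × Char) : Int :=
  if p.2 == '1' then
    match PySem.List.pyGet? line p.1 with
    | some v => PySem.Int.band c v
    | none => c
  else if p.2 == '0' then
    match PySem.List.pyGet? line p.1 with
    | some v => PySem.Int.band c ((0 : Int) ^ v.toNat)
    | none => c
  else c

def find_vector (dnf : List String) (n : Int) : List Int :=
  (create_truth_table n).foldl (fun vec line =>
    vec ++ [dnf.foldl (fun d part =>
      PySem.Int.bor d ((PySem.List.enumerate part.toList 0).foldl (conjStep line) 1)) 0]) []

-- ===== PORT B =====
-- 2 ** n is ported as 2 ^ n.toNat: exact for n ≥ 0 (n < 0 raises TypeError, outside Pre_)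
def find_vector_alt (dnf : List String) (n : Int) : List Int :=
  let size := 2 ^ n.toNat
  let vector := (List.range size).foldl (fun v _ => v ++ [(0 : Int)]) []
  dnf.foldl (fun vector part =>
    let idxs := (List.range n.toNat).foldl (fun idxs j =>
      let x := part.toList.getD j '*'
      if x == '1' then idxs.map (fun i => 2 * i + 1)
      else if x == '0' then idxs.map (fun i => 2 * i)
      else idxs.map (fun i => 2 * i) ++ idxs.map (fun i => 2 * i + 1)) ([0] : List Nat)
    idxs.foldl (fun v i => v.set i 1) vector) vector

-- ===== PRECONDITION & SPEC =====
-- Exactly the inputs on which A returns: n ≥ 0 (range(2**n) raises TypeError otherwise) and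
-- no '0'/'1' occurs in a term at an index ≥ n (there A's line[i] raises IndexError).
def Pre_find_vector (dnf : List String) (n : Int) : Prop :=
  0 ≤ n ∧ ∀ part ∈ dnf, ∀ p ∈ PySem.List.enumerate part.toList 0,
    (p.2 = '1' ∨ p.2 = '0') → p.1 < n
instance (dnf : List String) (n : Int) : Decidable (Pre_find_vector dnf n) := by
  unfold Pre_find_vector; infer_instance

def pvWitness_find_vector : List String × Int := (["1*", "01"], 2)

def Spec_find_vector (dnf : List String) (n : Int) (out : List Int) : Prop := out = find_vector_alt dnf n
instance (dnf : List String) (n : Int) (out : List Int) : Decidable (Spec_find_vector dnf n out) := by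
  unfold Spec_find_vector; infer_instance

-- ===== CLAIM (what is proved, stated in full; the proofs are below) =====
def Claim_equal_find_vector : Prop := ∀ (dnf : List String) (n : Int), Dom_find_vector dnf n → Pre_find_vector dnf n → Spec_find_vector dnf n (find_vector dnf n)

-- ===== LEMMAS AND PROOFS =====
def descInts (m : Nat) : List Int := (List.range m).reverse.map Nat.cast

-- row of the truth table: line[j] = bit (m-1-j) of k
def rowOf (m k : Nat) : List Int :=
  (List.range m).map (fun j => if k.testBit (m - 1 - j) then 1 else 0)

theorem length_rowOf (m k : Nat) : (rowOf m k).length = m := by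
  simp [rowOf]

theorem rowOf_succ (m k : Nat) :
    rowOf (m + 1) k = rowOf m (k / 2) ++ [if k.testBit 0 then (1:Int) else 0] := by
  simp only [rowOf, List.range_succ, List.map_append, List.map_cons, List.map_nil]
  congr 1
  · apply List.map_congr_left
    intro j hj
    have hj' : j < m := List.mem_range.mp hj
    have : m + 1 - 1 - j = (m - 1 - j) + 1 := by omega
    rw [this, ← Nat.testBit_div_two]
  · simp

theorem boolUpGo_append (xs : List Int) (l : List Int) (c : Int)
    (h : ∀ x ∈ xs, ∃ j : Nat, x = (j : Int) ∧ j < l.length) :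
    boolUpGo (l ++ [c]) xs = boolUpGo l xs ++ [c] := by
  induction xs generalizing l with
  | nil => simp [boolUpGo]
  | cons x rest ih =>
    obtain ⟨j, rfl, hj⟩ := h x (by simp)
    rw [boolUpGo, boolUpGo]
    rw [PySem.List.pyGet?_natCast, PySem.List.pyGet?_natCast]
    rw [List.getElem?_append_left hj]
    cases hv : l[j]? with
    | none => simp at hv; omega
    | some v =>
      simp only [Int.toNat_natCast]
      by_cases h0 : v = 0
      · simp [h0, hj]
      · have : (v == 0) = false := by simp [h0]
        simp only [this, Bool.false_eq_true, if_false]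
        rw [List.set_append]
        simp only [hj, if_pos]
        rw [ih]
        intro y hy
        obtain ⟨t, rfl, ht⟩ := h y (by simp [hy])
        exact ⟨t, rfl, by simpa using ht⟩

-- binary increment
theorem boolUpGo_incr (m k : Nat) :
    boolUpGo (rowOf m k) (descInts m) = rowOf m (k + 1) := by
  induction m generalizing k with
  | zero => simp [rowOf, descInts, boolUpGo]
  | succ m ih =>
    have hrev : descInts (m+1) = (m : Int) :: descInts m := by
      unfold descInts
      rw [List.range_succ, List.reverse_append]; simp
    rw [hrev, rowOf_succ, boolUpGo]
    have hlen : (rowOf m (k / 2)).length = m := length_rowOf m (k / 2)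
    rw [PySem.List.pyGet?_natCast]
    have hget : (rowOf m (k/2) ++ [if k.testBit 0 then (1:Int) else 0])[m]? =
        some (if k.testBit 0 then (1:Int) else 0) := by
      have h := List.getElem?_concat_length (l := rowOf m (k/2))
        (a := if k.testBit 0 then (1:Int) else 0)
      rwa [hlen] at h
    rw [hget]
    cases hb : k.testBit 0 with
    | false =>
      have hk2 : k % 2 = 0 := by simpa [Nat.testBit_zero] using hb
      have h1 : (k+1) / 2 = k / 2 := by omega
      have h2 : (k+1).testBit 0 = true := by
        simp [Nat.testBit_zero]; omega
      simp only [Bool.false_eq_true, if_false, Int.toNat_natCast, beq_self_eq_true, if_true]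
      rw [List.set_append]
      simp only [hlen, lt_irrefl, if_false, Nat.sub_self]
      rw [rowOf_succ, h1, h2]
      simp
    | true =>
      have hk2 : k % 2 = 1 := by simpa [Nat.testBit_zero] using hb
      have h1 : (k+1) / 2 = k / 2 + 1 := by omega
      have h2 : (k+1).testBit 0 = false := by
        simp [Nat.testBit_zero]; omega
      simp only [if_true, Int.toNat_natCast]
      have hne : ((1:Int) == 0) = false := by decide
      rw [hne]
      simp only [Bool.false_eq_true, if_false]
      rw [List.set_append]
      simp only [hlen, lt_irrefl, if_false, Nat.sub_self, List.set_cons_zero]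
      rw [boolUpGo_append]
      · rw [ih, rowOf_succ, h1, h2]
        simp
      · intro x hx
        simp only [descInts, List.mem_map, List.mem_reverse, List.mem_range] at hx
        obtain ⟨t, ht, rfl⟩ := hx
        exact ⟨t, rfl, by omega⟩

-- the descending range of bool_up
theorem pyRange_desc (m : Nat) :
    PySem.List.pyRange ((m : Int) - 1) (-1) (-1) = descInts m := by
  rw [PySem.List.pyRange]
  rw [if_neg (by decide)]
  rw [if_neg (by decide)]
  by_cases hm : 0 < m
  · rw [if_pos (by omega)]
    have hc : ((m : Int) - 1 - -1 + - -1 - 1) / - -1 = (m : Int) := by norm_num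
    rw [hc, Int.toNat_natCast]
    apply List.ext_getElem
    · simp [descInts]
    · intro i h1 h2
      simp only [descInts, List.length_map] at h2
      simp only [descInts, List.getElem_map, List.getElem_reverse, List.length_range,
        List.getElem_range]
      simp only [List.length_reverse, List.length_range] at h2
      omega
  · have : m = 0 := by omega
    subst this
    simp [descInts]

-- ===== A-side characterization =====

def condC (c : Char) (b : Bool) : Bool := if c = '1' then b else if c = '0' then !b else true

def okA (cs : List Char) (m k : Nat) : Bool :=
  cs.zipIdx.all (fun p => condC p.1 (k.testBit (m - 1 - p.2)))

theorem enumerate_eq_aux (cs : List Char) (s : Int) (t : Nat) :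
    PySem.List.enumerate cs s = (cs.zipIdx t).map (fun p => (s - t + (p.2 : Int), p.1)) := by
  induction cs generalizing s t with
  | nil => simp [PySem.List.enumerate]
  | cons c cs ih =>
    rw [PySem.List.enumerate, List.zipIdx_cons, List.map_cons]
    congr 1
    · simp only [Prod.mk.injEq]
      exact ⟨by omega, trivial⟩
    · rw [ih (s+1) (t+1)]
      apply List.map_congr_left
      intro p _
      simp only [Prod.mk.injEq]
      exact ⟨by push_cast; omega, trivial⟩

theorem enumerate_eq (cs : List Char) :
    PySem.List.enumerate cs 0 = cs.zipIdx.map (fun p => ((p.2 : Int), p.1)) := by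
  rw [enumerate_eq_aux cs 0 0]
  apply List.map_congr_left
  intro p _
  simp only [Prod.mk.injEq]
  exact ⟨by omega, trivial⟩

theorem conjStep_eq (m k : Nat) (c : Int) (hc : c = 0 ∨ c = 1) (x : Char) (j : Nat)
    (hj : (x = '1' ∨ x = '0') → j < m) :
    conjStep (rowOf m k) c ((j : Int), x) =
      if condC x (k.testBit (m - 1 - j)) then c else 0 := by
  have hget : (x = '1' ∨ x = '0') →
      PySem.List.pyGet? (rowOf m k) ((j : Int)) =
        some (if k.testBit (m - 1 - j) then (1:Int) else 0) := by
    intro hx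
    rw [PySem.List.pyGet?_natCast]
    simp [rowOf, hj hx]
  unfold conjStep condC
  by_cases h1 : x = '1'
  · simp only [h1, beq_self_eq_true, if_pos]
    rw [hget (Or.inl h1)]
    rcases hc with rfl | rfl <;> cases hb : k.testBit (m - 1 - j) <;> simp <;> decide
  · by_cases h0 : x = '0'
    · have : (x == '1') = false := by simp [h1]
      simp only [this, Bool.false_eq_true, if_false, h0, beq_self_eq_true, if_pos]
      rw [hget (Or.inr h0)]
      rcases hc with rfl | rfl <;> cases hb : k.testBit (m - 1 - j) <;> simp <;> decide
    · have e1 : (x == '1') = false := by simp [h1]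
      have e0 : (x == '0') = false := by simp [h0]
      simp [e1, e0, h1, h0]

theorem conj_fold (m k : Nat) (L : List (Char × Nat)) (c : Int) (hc : c = 0 ∨ c = 1)
    (hL : ∀ p ∈ L, (p.1 = '1' ∨ p.1 = '0') → p.2 < m) :
    (L.map (fun p => ((p.2 : Int), p.1))).foldl (conjStep (rowOf m k)) c =
      if c = 1 ∧ (L.all (fun p => condC p.1 (k.testBit (m - 1 - p.2)))) = true then 1 else 0 := by
  induction L generalizing c with
  | nil =>
    rcases hc with rfl | rfl <;> simp
  | cons p rest ih =>
    obtain ⟨x, j⟩ := p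
    rw [List.map_cons, List.foldl_cons,
      conjStep_eq m k c hc x j (hL (x, j) (by simp))]
    have hrest : ∀ p ∈ rest, (p.1 = '1' ∨ p.1 = '0') → p.2 < m :=
      fun p hp => hL p (List.mem_cons_of_mem _ hp)
    by_cases h : condC x (k.testBit (m - 1 - j)) = true
    · rw [if_pos h, ih c hc hrest]
      rw [List.all_cons, h, Bool.true_and]
    · rw [if_neg h, ih 0 (Or.inl rfl) hrest]
      simp [List.all_cons, h]

theorem bor_fold (parts : List String) (g : String → Bool) (d : Int) (hd : d = 0 ∨ d = 1)
    (f : String → Int) (hf : ∀ p ∈ parts, f p = if g p then 1 else 0) :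
    parts.foldl (fun d part => PySem.Int.bor d (f part)) d =
      if d = 1 ∨ parts.any g then 1 else 0 := by
  induction parts generalizing d with
  | nil => rcases hd with rfl | rfl <;> simp
  | cons p rest ih =>
    rw [List.foldl_cons, hf p (by simp)]
    have step : PySem.Int.bor d (if g p then 1 else 0) = if d = 1 ∨ g p then 1 else 0 := by
      rcases hd with rfl | rfl <;> cases hg : g p <;> simp <;> decide
    rw [step]
    have hrest := fun q hq => hf q (List.mem_cons_of_mem p hq)
    by_cases hg : d = 1 ∨ g p = true
    · rw [if_pos hg, ih 1 (Or.inr rfl) hrest, if_pos (Or.inl rfl),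
        if_pos (by cases hg with
          | inl h => exact Or.inl h
          | inr h => exact Or.inr (by simp [List.any_cons, h]))]
    · obtain ⟨h1, h2⟩ := not_or.mp hg
      rw [if_neg hg, ih 0 (Or.inl rfl) hrest]
      simp [List.any_cons, h1, h2]

-- ===== B-side characterization =====

def okB (cs : List Char) (j i : Nat) : Bool :=
  (List.range j).all (fun t => condC (cs.getD t '*') (i.testBit (j - 1 - t)))

def idxsF (cs : List Char) (j : Nat) : List Nat :=
  (List.range j).foldl (fun idxs t =>
    let x := cs.getD t '*'
    if x == '1' then idxs.map (fun i => 2 * i + 1)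
    else if x == '0' then idxs.map (fun i => 2 * i)
    else idxs.map (fun i => 2 * i) ++ idxs.map (fun i => 2 * i + 1)) ([0] : List Nat)

theorem okB_succ (cs : List Char) (j i : Nat) :
    okB cs (j + 1) i = (okB cs j (i / 2) && condC (cs.getD j '*') (i.testBit 0)) := by
  unfold okB
  rw [List.range_succ, List.all_append]
  have h2 : List.all [j] (fun t => condC (cs.getD t '*') (i.testBit (j + 1 - 1 - t)))
      = condC (cs.getD j '*') (i.testBit 0) := by
    simp
  rw [h2]
  congr 1
  rw [Bool.eq_iff_iff]
  simp only [List.all_eq_true, List.mem_range]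
  constructor
  · intro h t ht
    have h' := h t ht
    rwa [show j + 1 - 1 - t = j - 1 - t + 1 from by omega, ← Nat.testBit_div_two] at h'
  · intro h t ht
    have h' := h t ht
    rw [show j + 1 - 1 - t = j - 1 - t + 1 from by omega, ← Nat.testBit_div_two]
    exact h'

theorem mem_idxsF (cs : List Char) (j i : Nat) :
    i ∈ idxsF cs j ↔ (i < 2 ^ j ∧ okB cs j i = true) := by
  induction j generalizing i with
  | zero => simp [idxsF, okB]
  | succ j ih =>
    have hstep : idxsF cs (j + 1) =
        (if (cs.getD j '*' == '1') = true then (idxsF cs j).map (fun i => 2 * i + 1)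
         else if (cs.getD j '*' == '0') = true then (idxsF cs j).map (fun i => 2 * i)
         else (idxsF cs j).map (fun i => 2 * i) ++ (idxsF cs j).map (fun i => 2 * i + 1)) := by
      unfold idxsF
      rw [List.range_succ, List.foldl_append, List.foldl_cons, List.foldl_nil]
    rw [hstep, okB_succ]
    have hib : i % 2 = 1 ↔ i.testBit 0 = true := by simp [Nat.testBit_zero]
    by_cases h1 : cs.getD j '*' = '1'
    · have hc : condC (cs.getD j '*') (i.testBit 0) = i.testBit 0 := by
        rw [h1]; simp [condC]
      rw [if_pos (by simp only [beq_iff_eq]; exact h1), hc]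
      simp only [List.mem_map, Bool.and_eq_true]
      constructor
      · rintro ⟨a, ha, rfl⟩
        obtain ⟨hb, hok⟩ := (ih a).mp ha
        refine ⟨by rw [pow_succ]; omega, ?_, ?_⟩
        · rw [show (2 * a + 1) / 2 = a from by omega]; exact hok
        · rw [← hib]; omega
      · rintro ⟨hb, hok, hbit⟩
        refine ⟨i / 2, (ih (i / 2)).mpr ⟨by rw [pow_succ] at hb; omega, hok⟩, ?_⟩
        rw [← hib] at hbit; omega
    · by_cases h0 : cs.getD j '*' = '0'
      · have hc : condC (cs.getD j '*') (i.testBit 0) = !(i.testBit 0) := by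
          rw [h0]; simp [condC]
        rw [if_neg (by simp only [beq_iff_eq]; exact h1), if_pos (by simp only [beq_iff_eq]; exact h0), hc]
        simp only [List.mem_map, Bool.and_eq_true, Bool.not_eq_true']
        constructor
        · rintro ⟨a, ha, rfl⟩
          obtain ⟨hb, hok⟩ := (ih a).mp ha
          refine ⟨by rw [pow_succ]; omega, ?_, ?_⟩
          · rw [show (2 * a) / 2 = a from by omega]; exact hok
          · rw [← Bool.not_eq_true, ← hib]; omega
        · rintro ⟨hb, hok, hbit⟩
          refine ⟨i / 2, (ih (i / 2)).mpr ⟨by rw [pow_succ] at hb; omega, hok⟩, ?_⟩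
          rw [← Bool.not_eq_true, ← hib] at hbit; omega
      · have hc : condC (cs.getD j '*') (i.testBit 0) = true := by
          simp only [condC, if_neg h1, if_neg h0]
        rw [if_neg (by simp only [beq_iff_eq]; exact h1), if_neg (by simp only [beq_iff_eq]; exact h0), hc]
        simp only [List.mem_append, List.mem_map, Bool.and_true]
        constructor
        · rintro (⟨a, ha, rfl⟩ | ⟨a, ha, rfl⟩) <;>
            obtain ⟨hb, hok⟩ := (ih a).mp ha
          · exact ⟨by rw [pow_succ]; omega, by rw [show (2*a)/2 = a from by omega]; exact hok⟩
          · exact ⟨by rw [pow_succ]; omega, by rw [show (2*a+1)/2 = a from by omega]; exact hok⟩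
        · rintro ⟨hb, hok⟩
          have hmem : i / 2 ∈ idxsF cs j := (ih (i / 2)).mpr ⟨by rw [pow_succ] at hb; omega, hok⟩
          by_cases hp : i % 2 = 0
          · exact Or.inl ⟨i / 2, hmem, by omega⟩
          · exact Or.inr ⟨i / 2, hmem, by omega⟩

theorem table_fold (m : Nat) (N : Nat) (A : List (List Int)) (k : Nat) :
    (List.range N).foldl (fun st _ => (st.1 ++ [st.2], bool_up st.2 (m : Int))) (A, rowOf m k)
      = (A ++ (List.range N).map (fun i => rowOf m (k + i)), rowOf m (k + N)) := by
  induction N with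
  | zero => simp
  | succ N ih =>
    rw [List.range_succ, List.foldl_append, ih, List.foldl_cons, List.foldl_nil]
    have hb : bool_up (rowOf m (k + N)) (m : Int) = rowOf m (k + N + 1) := by
      rw [bool_up, pyRange_desc, boolUpGo_incr]
    rw [hb]
    simp [List.map_append, List.append_assoc, Nat.add_assoc]

theorem ctt_eq (m : Nat) :
    create_truth_table (m : Int) = (List.range (2 ^ m)).map (rowOf m) := by
  unfold create_truth_table
  simp only [Int.toNat_natCast]
  have hline : (List.range m).foldl (fun l _ => l ++ [(0:Int)]) [] = rowOf m 0 := by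
    rw [PySem.List.foldl_append_singleton_eq_map (fun _ => (0:Int)) (List.range m) []]
    simp [rowOf, Nat.zero_testBit]
  rw [hline, table_fold m (2 ^ m) [] 0]
  simp

theorem A_eq (dnf : List String) (m : Nat)
    (hpre : ∀ part ∈ dnf, ∀ p ∈ part.toList.zipIdx, (p.1 = '1' ∨ p.1 = '0') → p.2 < m) :
    find_vector dnf (m : Int) =
      (List.range (2 ^ m)).map
        (fun k => if dnf.any (fun part => okA part.toList m k) then 1 else 0) := by
  unfold find_vector
  rw [ctt_eq]
  rw [PySem.List.foldl_append_singleton_eq_map]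
  rw [List.map_map]
  apply List.map_congr_left
  intro k _
  simp only [Function.comp]
  rw [bor_fold dnf (fun part => okA part.toList m k) 0 (Or.inl rfl)
    (fun part => (PySem.List.enumerate part.toList 0).foldl (conjStep (rowOf m k)) 1)
    (fun part hp => by
      show List.foldl (conjStep (rowOf m k)) 1 (PySem.List.enumerate part.toList 0)
          = if okA part.toList m k then 1 else 0
      rw [enumerate_eq, conj_fold m k part.toList.zipIdx 1 (Or.inr rfl) (hpre part hp)]
      simp only [okA, true_and]
      exact if_congr Iff.rfl rfl rfl)]
  simp

theorem okA_eq_okB (cs : List Char) (m k : Nat)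
    (hcs : ∀ p ∈ cs.zipIdx, (p.1 = '1' ∨ p.1 = '0') → p.2 < m) :
    okA cs m k = okB cs m k := by
  rw [Bool.eq_iff_iff]
  unfold okA okB
  simp only [List.all_eq_true, List.mem_range]
  constructor
  · intro h t ht
    by_cases hlt : t < cs.length
    · have hmem : ((cs[t], t) : Char × Nat) ∈ cs.zipIdx := by
        rw [List.mem_zipIdx_iff_getElem?]
        simp [hlt]
      have h' := h _ hmem
      have hx : cs.getD t '*' = cs[t] := by
        simp [List.getD_eq_getElem?_getD, List.getElem?_eq_getElem hlt]
      rw [hx]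
      exact h'
    · have hx : cs.getD t '*' = '*' := by
        simp [List.getD_eq_getElem?_getD, List.getElem?_eq_none (show cs.length ≤ t by omega)]
      rw [hx]
      simp [condC]
  · intro h p hp
    obtain ⟨x, t⟩ := p
    have hget := List.mem_zipIdx_iff_getElem?.mp hp
    simp only at hget
    have hlt : t < cs.length := by
      by_contra hge
      rw [List.getElem?_eq_none (show cs.length ≤ t by omega)] at hget
      simp at hget
    have hx : cs.getD t '*' = x := by
      simp [List.getD_eq_getElem?_getD, hget]
    by_cases htm : t < m
    · have h' := h t htm
      rwa [hx] at h'
    · have hx01 : ¬(x = '1' ∨ x = '0') := fun hcase => absurd (hcs (x, t) hp hcase) htm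
      push Not at hx01
      simp [condC, hx01.1, hx01.2]

-- set-to-1 folds
theorem length_setFold (L : List Nat) (v : List Int) :
    (L.foldl (fun v i => v.set i 1) v).length = v.length := by
  induction L generalizing v with
  | nil => rfl
  | cons i rest ih => rw [List.foldl_cons, ih, List.length_set]

theorem getD_setFold (L : List Nat) (v : List Int) (k : Nat) :
    (L.foldl (fun v i => v.set i 1) v).getD k 0 =
      if k ∈ L then (if k < v.length then 1 else 0) else v.getD k 0 := by
  induction L generalizing v with
  | nil => simp
  | cons i rest ih =>
    rw [List.foldl_cons, ih, List.length_set]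
    by_cases hk : k ∈ rest
    · simp [hk, List.mem_cons]
    · by_cases hik : i = k
      · subst hik
        simp [hk, List.getD_eq_getElem?_getD, List.getElem?_set]
        by_cases hlen : i < v.length <;> simp [hlen]
      · have : (k ∈ i :: rest) ↔ False := by simp [hk, Ne.symm hik, hik]
        simp only [this, if_false, hk]
        simp [List.getD_eq_getElem?_getD, List.getElem?_set, hik]

theorem length_outer (parts : List String) (m : Nat) (v : List Int) :
    (parts.foldl (fun v part => (idxsF part.toList m).foldl (fun v i => v.set i 1) v) v).length
      = v.length := by
  induction parts generalizing v with
  | nil => rfl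
  | cons p rest ih => rw [List.foldl_cons, ih, length_setFold]

theorem getD_outer (parts : List String) (m : Nat) (v : List Int) (k : Nat) :
    (parts.foldl (fun v part => (idxsF part.toList m).foldl (fun v i => v.set i 1) v) v).getD k 0
      = if parts.any (fun part => decide (k ∈ idxsF part.toList m)) then
          (if k < v.length then 1 else 0) else v.getD k 0 := by
  induction parts generalizing v with
  | nil => simp
  | cons p rest ih =>
    rw [List.foldl_cons, ih, length_setFold, getD_setFold]
    by_cases hk : k ∈ idxsF p.toList m
    · simp [List.any_cons, hk]
    · simp [List.any_cons, hk]

theorem alt_eq (dnf : List String) (m : Nat)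
    (hpre : ∀ part ∈ dnf, ∀ p ∈ part.toList.zipIdx, (p.1 = '1' ∨ p.1 = '0') → p.2 < m) :
    find_vector_alt dnf (m : Int) =
      (List.range (2 ^ m)).map
        (fun k => if dnf.any (fun part => okA part.toList m k) then 1 else 0) := by
  have hlen0 : ((List.range (2 ^ m)).map (fun _ => (0:Int))).length = 2 ^ m := by simp
  have hshape : find_vector_alt dnf (m : Int) =
      dnf.foldl (fun v part => (idxsF part.toList m).foldl (fun v i => v.set i 1) v)
        ((List.range (2 ^ m)).map (fun _ => (0:Int))) := by
    unfold find_vector_alt idxsF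
    simp only [Int.toNat_natCast]
    rw [PySem.List.foldl_append_singleton_eq_map (fun _ => (0:Int)) (List.range (2 ^ m)) []]
    rw [List.nil_append]
  rw [hshape]
  apply List.ext_getElem
  · rw [length_outer]; simp
  · intro k hk1 hk2
    rw [length_outer, hlen0] at hk1
    rw [← List.getD_eq_getElem _ 0 (by rw [length_outer, hlen0]; exact hk1)]
    rw [getD_outer, hlen0]
    rw [List.getElem_map, List.getElem_range]
    have hany : dnf.any (fun part => decide (k ∈ idxsF part.toList m))
        = dnf.any (fun part => okA part.toList m k) := by
      rw [Bool.eq_iff_iff]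
      simp only [List.any_eq_true]
      constructor
      · rintro ⟨part, hp, hdec⟩
        refine ⟨part, hp, ?_⟩
        rw [okA_eq_okB _ _ _ (hpre part hp)]
        exact ((mem_idxsF _ _ _).mp (of_decide_eq_true hdec)).2
      · rintro ⟨part, hp, hok⟩
        refine ⟨part, hp, decide_eq_true ((mem_idxsF _ _ _).mpr ⟨hk1, ?_⟩)⟩
        rw [← okA_eq_okB _ _ _ (hpre part hp)]
        exact hok
    rw [hany]
    by_cases h : dnf.any (fun part => okA part.toList m k) = true
    · simp [h, hk1]
    · simp only [Bool.not_eq_true] at h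
      have hz : ((List.range (2 ^ m)).map (fun _ => (0:Int))).getD k 0 = 0 := by
        rw [List.getD_eq_getElem _ 0 (by simpa using hk1)]
        simp
      simp [h, hz, hk1]

theorem main_eq (dnf : List String) (n : Int)
    (hn : 0 ≤ n)
    (hp : ∀ part ∈ dnf, ∀ p ∈ PySem.List.enumerate part.toList 0,
      (p.2 = '1' ∨ p.2 = '0') → p.1 < n) :
    find_vector dnf n = find_vector_alt dnf n := by
  obtain ⟨m, rfl⟩ : ∃ m : Nat, n = (m : Int) := ⟨n.toNat, (Int.toNat_of_nonneg hn).symm⟩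
  have hpre' : ∀ part ∈ dnf, ∀ p ∈ part.toList.zipIdx, (p.1 = '1' ∨ p.1 = '0') → p.2 < m := by
    intro part hpart p hp2 hx
    have h' := hp part hpart ((p.2 : Int), p.1)
      (by rw [enumerate_eq]; exact List.mem_map_of_mem hp2) hx
    simp only at h'
    exact_mod_cast h'
  rw [A_eq dnf m hpre', alt_eq dnf m hpre']

-- ===== VERDICT (by name: the statement is the Claim_ definition above) =====
theorem find_vector_spec : Claim_equal_find_vector := by
  intro dnf n _ hpre
  unfold Pre_find_vector at hpre
  unfold Spec_find_vector
  exact main_eq dnf n hpre.1 hpre.2
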